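-- pv_equiv track=rewrite | github.com/canonical/operator-workflows | tests/spread/create_spread_task_file.py | extract_rst_headers
-- ===== SOURCE A (Python) =====
-- def extract_rst_headers(content):
--     """
--     Extract all headers from reStructuredText content.
--
--     In RST, headers are text followed by a line of special characters (=, -, ~, etc.)
--     of the same length as the header text.
--
--     Args:
--         content: reStructuredText content as string
--
--     Returns:
--         List of tuples (position, level, title) for each header
--     """
--     headers = []
--     lines = content.split('\n')
--
--     # Common RST header characters in order of typical hierarchy
--     header_chars = ['=', '-', '~', '^', '"', "'", '`', ':', '.', '_', '*', '+', '#']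
--     char_to_level = {}
--     current_level = 0
--
--     i = 0
--     position = 0
--
--     while i < len(lines):
--         if i + 1 < len(lines):
--             line = lines[i].rstrip()
--             next_line = lines[i + 1].rstrip()
--
--             # Check if next line is an underline (same length, all same special char)
--             if (line and next_line and
--                 len(line) == len(next_line) and
--                 len(set(next_line)) == 1 and
--                 next_line[0] in header_chars):
--
--                 char = next_line[0]
--
--                 # Assign level based on first appearance order
--                 if char not in char_to_level:
--                     char_to_level[char] = current_level
--                     current_level += 1
--
--                 level = char_to_level[char]
--                 title = line.strip()
--                 headers.append((position, level, title))
--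
--                 i += 2  # Skip the underline
--                 position += len(lines[i - 2]) + len(lines[i - 1]) + 2  # +2 for newlines
--                 continue
--
--         position += len(lines[i]) + 1  # +1 for newline
--         i += 1
--
--     return headers
-- ===== SOURCE B (Python) =====
-- def extract_rst_headers(content):
--     """
--     Extract all headers from reStructuredText content.
--
--     Two-phase reformulation: (1) precompute each line's character offset in a
--     table, and scan adjacent line pairs to collect detected headers as
--     (offset, underline_char, title); (2) assign levels by first appearance of
--     the underline character in a separate pass.
--     """
--     lines = content.split('\n')
--     header_chars = ['=', '-', '~', '^', '"', "'", '`', ':', '.', '_', '*', '+', '#']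
--
--     # Phase 0: offset table — offsets[i] = character position of the start of line i.
--     offsets = []
--     total = 0
--     for ln in lines:
--         offsets.append(total)
--         total += len(ln) + 1
--
--     # Phase 1: detection — collect (offset, underline char, title), skipping underlines.
--     detected = []
--     i = 0
--     while i + 1 < len(lines):
--         line = lines[i].rstrip()
--         under = lines[i + 1].rstrip()
--         if (line and under and
--                 len(line) == len(under) and
--                 len(set(under)) == 1 and
--                 under[0] in header_chars):
--             detected.append((offsets[i], under[0], line.strip()))
--             i += 2
--         else:
--             i += 1
--
--     # Phase 2: level assignment by first appearance.
--     levels = {}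
--     result = []
--     for pos, ch, title in detected:
--         if ch not in levels:
--             levels[ch] = len(levels)
--         result.append((pos, levels[ch], title))
--     return result
-- ===== Notes on version B (the rewrite author's own statement) =====
-- stated objective: alternative
-- what changed: Replaces A's single interleaved loop (running position counter and level dict updated inline) by three separate phases: a precomputed per-line offset table, a detection pass collecting (offset, char, title) triples, and a final pass assigning levels by first appearance.
import Mathlib
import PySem

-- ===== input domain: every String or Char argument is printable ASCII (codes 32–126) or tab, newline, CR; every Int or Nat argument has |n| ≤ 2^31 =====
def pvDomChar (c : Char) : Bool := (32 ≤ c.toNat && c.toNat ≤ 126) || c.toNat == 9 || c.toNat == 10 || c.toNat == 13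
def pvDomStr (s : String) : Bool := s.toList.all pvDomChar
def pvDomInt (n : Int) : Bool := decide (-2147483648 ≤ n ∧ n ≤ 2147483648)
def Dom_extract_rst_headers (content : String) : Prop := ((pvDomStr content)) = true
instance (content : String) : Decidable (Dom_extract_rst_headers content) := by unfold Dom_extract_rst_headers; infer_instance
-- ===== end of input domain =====

-- B replaces A's single interleaved loop (running position, inline level dict) by three
-- phases: a precomputed offset table, a detection pass, and a level-assignment pass
-- (objective: alternative decomposition, same cost).

-- shared constant: the literal header_chars list both Pythons contain
def pvHeaderChars : List Char := ['=', '-', '~', '^', '"', '\'', '`', ':', '.', '_', '*', '+', '#']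

-- ===== PORT A =====
-- the while loop over index i with state (position, char_to_level, current_level, headers)
def pvALoop (lines : List String) (i : Nat) (position : Int)
    (d : PySem.Dict Char Int) (cl : Int) (headers : List (Int × Int × String)) :
    List (Int × Int × String) :=
  if _h : i < lines.length then
    if _h2 : i + 1 < lines.length then
      let line := PySem.Str.rstrip (lines.getD i "")
      let next_line := PySem.Str.rstrip (lines.getD (i + 1) "")
      if line ≠ "" ∧ next_line ≠ "" ∧
          PySem.Str.len line = PySem.Str.len next_line ∧
          (PySem.Set.ofList next_line.toList).length = 1 ∧
          next_line.toList.headD ' ' ∈ pvHeaderChars then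
        let c := next_line.toList.headD ' '
        let d' := if d.contains c then d else d.insert c cl
        let cl' := if d.contains c then cl else cl + 1
        let level := d'.getD c 0
        let title := PySem.Str.strip line
        pvALoop lines (i + 2)
          (position + PySem.Str.len (lines.getD i "") + PySem.Str.len (lines.getD (i + 1) "") + 2)
          d' cl' (headers ++ [(position, level, title)])
      else
        pvALoop lines (i + 1) (position + PySem.Str.len (lines.getD i "") + 1) d cl headers
    else
      pvALoop lines (i + 1) (position + PySem.Str.len (lines.getD i "") + 1) d cl headers
  else headers
termination_by lines.length - i

def extract_rst_headers (content : String) : List (Int × Int × String) :=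
  pvALoop ((PySem.Str.split? content "\n").getD []) 0 0 PySem.Dict.empty 0 []

-- ===== PORT B =====
-- phase 0: offset table — offsets[i] = character position of the start of line i
def pvOffsets (lines : List String) : List Int :=
  (lines.foldl (fun (st : List Int × Int) ln => (st.1 ++ [st.2], st.2 + PySem.Str.len ln + 1))
    ([], 0)).1

-- phase 1: detection — collect (offset, underline char, title), skipping underlines
def pvDetect (lines : List String) (offsets : List Int) (i : Nat)
    (detected : List (Int × Char × String)) : List (Int × Char × String) :=
  if _h : i + 1 < lines.length then
    let line := PySem.Str.rstrip (lines.getD i "")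
    let under := PySem.Str.rstrip (lines.getD (i + 1) "")
    if line ≠ "" ∧ under ≠ "" ∧
        PySem.Str.len line = PySem.Str.len under ∧
        (PySem.Set.ofList under.toList).length = 1 ∧
        under.toList.headD ' ' ∈ pvHeaderChars then
      pvDetect lines offsets (i + 2)
        (detected ++ [(offsets.getD i 0, under.toList.headD ' ', PySem.Str.strip line)])
    else pvDetect lines offsets (i + 1) detected
  else detected
termination_by lines.length - i

-- phase 2: one step of the level-assignment fold
def pvAssignStep (st : PySem.Dict Char Int × List (Int × Int × String))
    (x : Int × Char × String) : PySem.Dict Char Int × List (Int × Int × String) :=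
  let levels := if st.1.contains x.2.1 then st.1 else st.1.insert x.2.1 (st.1.size : Int)
  (levels, st.2 ++ [(x.1, levels.getD x.2.1 0, x.2.2)])

def extract_rst_headers_alt (content : String) : List (Int × Int × String) :=
  let lines := (PySem.Str.split? content "\n").getD []
  let offsets := pvOffsets lines
  let detected := pvDetect lines offsets 0 []
  (detected.foldl pvAssignStep (PySem.Dict.empty, [])).2

-- ===== PRECONDITION & SPEC =====
def Spec_extract_rst_headers (content : String) (out : List (Int × Int × String)) : Prop := out = extract_rst_headers_alt content
instance (content : String) (out : List (Int × Int × String)) : Decidable (Spec_extract_rst_headers content out) := by unfold Spec_extract_rst_headers; infer_instance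

-- ===== CLAIM (what is proved, stated in full; the proofs are below) =====
def Claim_equal_extract_rst_headers : Prop := ∀ (content : String), Dom_extract_rst_headers content → Spec_extract_rst_headers content (extract_rst_headers content)

-- ===== LEMMAS AND PROOFS =====

-- character offset of the start of line i, computed from the raw line lengths
def pvOffAt (lines : List String) (i : Nat) : Int :=
  ((lines.take i).map (fun l => PySem.Str.len l + 1)).sum

lemma pvOffAt_succ (lines : List String) (i : Nat) (h : i < lines.length) :
    pvOffAt lines (i + 1) = pvOffAt lines i + PySem.Str.len (lines.getD i "") + 1 := by
  unfold pvOffAt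
  have h' : i < (lines.map (fun l => PySem.Str.len l + 1)).length := by simpa using h
  rw [List.map_take, List.map_take, List.sum_take_succ _ i h']
  simp [List.getD, List.getElem?_eq_getElem h]
  ring

-- closed form of B's offset list
def pvOffList : List String → Int → List Int
  | [], _ => []
  | l :: ls, t => t :: pvOffList ls (t + PySem.Str.len l + 1)

lemma pvOffsets_foldl (lines : List String) :
    ∀ (acc : List Int) (t : Int),
      (lines.foldl (fun (st : List Int × Int) ln => (st.1 ++ [st.2], st.2 + PySem.Str.len ln + 1))
        (acc, t)).1 = acc ++ pvOffList lines t := by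
  induction lines with
  | nil => intro acc t; simp [pvOffList]
  | cons l ls ih =>
      intro acc t
      simp only [List.foldl_cons, pvOffList]
      rw [ih]
      simp

lemma pvOffList_getD (lines : List String) :
    ∀ (t : Int) (i : Nat), i < lines.length →
      (pvOffList lines t).getD i 0 = t + pvOffAt lines i := by
  induction lines with
  | nil => intro t i h; simp at h
  | cons l ls ih =>
      intro t i h
      cases i with
      | zero => simp [pvOffList, pvOffAt]
      | succ j =>
          have hj : j < ls.length := by simpa using h
          have hstep : pvOffAt (l :: ls) (j + 1) = (PySem.Str.len l + 1) + pvOffAt ls j := by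
            unfold pvOffAt
            simp [List.take_succ_cons]
          simp only [pvOffList, List.getD_cons_succ]
          rw [ih _ j hj, hstep]
          ring

lemma pvOffsets_getD (lines : List String) (i : Nat) (h : i < lines.length) :
    (pvOffsets lines).getD i 0 = pvOffAt lines i := by
  unfold pvOffsets
  rw [pvOffsets_foldl lines [] 0]
  simp only [List.nil_append]
  rw [pvOffList_getD lines 0 i h]
  ring

-- one-step unfolding lemmas for the two loops (the `let`s zeta-reduce away)
lemma pvALoop_end (lines : List String) (i : Nat) (pos : Int) (d : PySem.Dict Char Int)
    (cl : Int) (acc : List (Int × Int × String)) (h0 : ¬ i < lines.length) :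
    pvALoop lines i pos d cl acc = acc := by
  rw [pvALoop, dif_neg h0]

lemma pvALoop_last (lines : List String) (i : Nat) (pos : Int) (d : PySem.Dict Char Int)
    (cl : Int) (acc : List (Int × Int × String)) (h0 : i < lines.length)
    (h1 : ¬ i + 1 < lines.length) :
    pvALoop lines i pos d cl acc
      = pvALoop lines (i + 1) (pos + PySem.Str.len (lines.getD i "") + 1) d cl acc := by
  rw [pvALoop, dif_pos h0, dif_neg h1]

lemma pvALoop_mid (lines : List String) (i : Nat) (pos : Int) (d : PySem.Dict Char Int)
    (cl : Int) (acc : List (Int × Int × String)) (h0 : i < lines.length)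
    (h1 : i + 1 < lines.length) :
    pvALoop lines i pos d cl acc
      = if PySem.Str.rstrip (lines.getD i "") ≠ "" ∧
            PySem.Str.rstrip (lines.getD (i + 1) "") ≠ "" ∧
            PySem.Str.len (PySem.Str.rstrip (lines.getD i "")) =
              PySem.Str.len (PySem.Str.rstrip (lines.getD (i + 1) "")) ∧
            (PySem.Set.ofList (PySem.Str.rstrip (lines.getD (i + 1) "")).toList).length = 1 ∧
            (PySem.Str.rstrip (lines.getD (i + 1) "")).toList.headD ' ' ∈ pvHeaderChars then
          pvALoop lines (i + 2)
            (pos + PySem.Str.len (lines.getD i "") + PySem.Str.len (lines.getD (i + 1) "") + 2)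
            (if d.contains ((PySem.Str.rstrip (lines.getD (i + 1) "")).toList.headD ' ') then d
              else d.insert ((PySem.Str.rstrip (lines.getD (i + 1) "")).toList.headD ' ') cl)
            (if d.contains ((PySem.Str.rstrip (lines.getD (i + 1) "")).toList.headD ' ') then cl
              else cl + 1)
            (acc ++ [(pos,
              (if d.contains ((PySem.Str.rstrip (lines.getD (i + 1) "")).toList.headD ' ') then d
                else d.insert ((PySem.Str.rstrip (lines.getD (i + 1) "")).toList.headD ' ') cl).getD
                ((PySem.Str.rstrip (lines.getD (i + 1) "")).toList.headD ' ') 0,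
              PySem.Str.strip (PySem.Str.rstrip (lines.getD i "")))])
        else pvALoop lines (i + 1) (pos + PySem.Str.len (lines.getD i "") + 1) d cl acc := by
  rw [pvALoop, dif_pos h0, dif_pos h1]

lemma pvDetect_mid (lines : List String) (offsets : List Int) (i : Nat)
    (acc : List (Int × Char × String)) (h1 : i + 1 < lines.length) :
    pvDetect lines offsets i acc
      = if PySem.Str.rstrip (lines.getD i "") ≠ "" ∧
            PySem.Str.rstrip (lines.getD (i + 1) "") ≠ "" ∧
            PySem.Str.len (PySem.Str.rstrip (lines.getD i "")) =
              PySem.Str.len (PySem.Str.rstrip (lines.getD (i + 1) "")) ∧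
            (PySem.Set.ofList (PySem.Str.rstrip (lines.getD (i + 1) "")).toList).length = 1 ∧
            (PySem.Str.rstrip (lines.getD (i + 1) "")).toList.headD ' ' ∈ pvHeaderChars then
          pvDetect lines offsets (i + 2)
            (acc ++ [(offsets.getD i 0,
              (PySem.Str.rstrip (lines.getD (i + 1) "")).toList.headD ' ',
              PySem.Str.strip (PySem.Str.rstrip (lines.getD i "")))])
        else pvDetect lines offsets (i + 1) acc := by
  rw [pvDetect, dif_pos h1]

-- detection stops past the last pair
-- detection stops past the last pair
lemma pvDetect_stop (lines : List String) (offsets : List Int) (i : Nat)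
    (acc : List (Int × Char × String)) (h : ¬ i + 1 < lines.length) :
    pvDetect lines offsets i acc = acc := by
  rw [pvDetect, dif_neg h]

-- the detection pass with accumulator: the accumulator splits off
lemma pvDetect_acc (lines : List String) (offsets : List Int) :
    ∀ (n i : Nat), lines.length - i ≤ n → ∀ (acc1 acc2 : List (Int × Char × String)),
      pvDetect lines offsets i (acc1 ++ acc2) = acc1 ++ pvDetect lines offsets i acc2 := by
  intro n
  induction n with
  | zero =>
      intro i hn acc1 acc2
      have h1 : ¬ i + 1 < lines.length := by omega
      rw [pvDetect_stop lines offsets i _ h1, pvDetect_stop lines offsets i acc2 h1]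
  | succ m ih =>
      intro i hn acc1 acc2
      by_cases h1 : i + 1 < lines.length
      · rw [pvDetect_mid lines offsets i _ h1, pvDetect_mid lines offsets i acc2 h1]
        split_ifs with hc
        · rw [List.append_assoc]
          exact ih (i + 2) (by omega) acc1 _
        · exact ih (i + 1) (by omega) acc1 acc2
      · rw [pvDetect_stop lines offsets i _ h1, pvDetect_stop lines offsets i acc2 h1]

lemma pvDetect_single (lines : List String) (offsets : List Int) (i : Nat)
    (x : Int × Char × String) :
    pvDetect lines offsets i [x] = x :: pvDetect lines offsets i [] := by
  have h := pvDetect_acc lines offsets lines.length i (by omega) [x] []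
  simpa using h

-- main invariant: A's interleaved loop equals B's assignment fold over B's detected list
lemma pvMain (lines : List String) :
    ∀ (n i : Nat), lines.length - i ≤ n →
      ∀ (d : PySem.Dict Char Int) (acc : List (Int × Int × String)),
        pvALoop lines i (pvOffAt lines i) d (d.size : Int) acc
          = ((pvDetect lines (pvOffsets lines) i []).foldl pvAssignStep (d, acc)).2 := by
  intro n
  induction n with
  | zero =>
      intro i hn d acc
      have h0 : ¬ i < lines.length := by omega
      have h1 : ¬ i + 1 < lines.length := by omega
      rw [pvALoop_end lines i _ d _ acc h0, pvDetect_stop lines (pvOffsets lines) i [] h1]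
      rfl
  | succ m ih =>
      intro i hn d acc
      by_cases h0 : i < lines.length
      · by_cases h1 : i + 1 < lines.length
        · rw [pvALoop_mid lines i _ d _ acc h0 h1, pvDetect_mid lines (pvOffsets lines) i [] h1]
          by_cases hc : PySem.Str.rstrip (lines.getD i "") ≠ "" ∧
              PySem.Str.rstrip (lines.getD (i + 1) "") ≠ "" ∧
              PySem.Str.len (PySem.Str.rstrip (lines.getD i "")) =
                PySem.Str.len (PySem.Str.rstrip (lines.getD (i + 1) "")) ∧
              (PySem.Set.ofList (PySem.Str.rstrip (lines.getD (i + 1) "")).toList).length = 1 ∧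
              (PySem.Str.rstrip (lines.getD (i + 1) "")).toList.headD ' ' ∈ pvHeaderChars
          · -- header detected at (i, i+1)
            rw [if_pos hc, if_pos hc, List.nil_append, pvDetect_single lines (pvOffsets lines) (i + 2) _,
              List.foldl_cons]
            simp only [pvAssignStep]
            rw [pvOffsets_getD lines i h0]
            have hoff : pvOffAt lines i + PySem.Str.len (lines.getD i "") +
                PySem.Str.len (lines.getD (i + 1) "") + 2 = pvOffAt lines (i + 2) := by
              rw [pvOffAt_succ lines (i + 1) h1, pvOffAt_succ lines i h0]
              ring
            by_cases hmem :
                d.contains ((PySem.Str.rstrip (lines.getD (i + 1) "")).toList.headD ' ') = true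
            · simp only [hmem, if_true]
              rw [hoff]
              exact ih (i + 2) (by omega) d _
            · simp only [hmem, if_false, Bool.false_eq_true]
              rw [hoff]
              have hsz : (d.insert ((PySem.Str.rstrip (lines.getD (i + 1) "")).toList.headD ' ')
                  (d.size : Int)).size = d.size + 1 := by
                rw [PySem.Dict.size_insert, if_neg hmem]
              have hcast : ((d.size : Int) + 1)
                  = (((d.insert ((PySem.Str.rstrip (lines.getD (i + 1) "")).toList.headD ' ')
                      (d.size : Int)).size : Nat) : Int) := by
                rw [hsz]; push_cast; ring
              rw [hcast]
              exact ih (i + 2) (by omega) _ _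
          · -- no header: both advance one line
            rw [if_neg hc, if_neg hc, ← pvOffAt_succ lines i h0]
            exact ih (i + 1) (by omega) d acc
        · -- last line: A walks over it, B's detection is already finished
          have h2 : ¬ i + 1 + 1 < lines.length := by omega
          rw [pvALoop_last lines i _ d _ acc h0 h1, ← pvOffAt_succ lines i h0,
            ih (i + 1) (by omega) d acc,
            pvDetect_stop lines (pvOffsets lines) (i + 1) [] h2,
            pvDetect_stop lines (pvOffsets lines) i [] h1]
      · have h1 : ¬ i + 1 < lines.length := by omega
        rw [pvALoop_end lines i _ d _ acc h0, pvDetect_stop lines (pvOffsets lines) i [] h1]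
        rfl

-- ===== VERDICT (by name: the statement is the Claim_ definition above) =====
theorem extract_rst_headers_spec : Claim_equal_extract_rst_headers := by
  intro content _
  unfold Spec_extract_rst_headers extract_rst_headers extract_rst_headers_alt
  have h := pvMain ((PySem.Str.split? content "\n").getD [])
    ((PySem.Str.split? content "\n").getD []).length 0 (by omega) PySem.Dict.empty []
  simpa [pvOffAt] using h
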